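-- pv_equiv track=rewrite | github.com/alphabet-al/AOC | 2023/Day_17/crucible.py | three_same_dir
-- ===== SOURCE A (Python) =====
-- def three_same_dir(path):
--     if len(path) < 4:
--         return False
--
--     last_direction = None
--     same_direction_count = 0
--
--     for i in range(len(path) - 1):
--         r, c = path[i]
--         next_r, next_c = path[i + 1]
--         direction = (next_r - r, next_c - c)
--
--         if direction == last_direction:
--             same_direction_count += 1
--         else:
--             same_direction_count = 1
--
--         if same_direction_count >= 3:
--             return True
--
--         last_direction = direction
--
--     return False
-- ===== SOURCE B (Python) =====
-- def three_same_dir(path):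
--     # A run of 3 equal moves exists iff some 4 consecutive points are equally
--     # spaced: p1-p0 == p2-p1 == p3-p2.  Stateless window test, no run counter.
--     return any(
--         (b[0] - a[0], b[1] - a[1])
--         == (c[0] - b[0], c[1] - b[1])
--         == (d[0] - c[0], d[1] - c[1])
--         for a, b, c, d in zip(path, path[1:], path[2:], path[3:])
--     )
-- ===== Notes on version B (the rewrite author's own statement) =====
-- stated objective: simpler
-- what changed: Replaces A's index loop with last-direction/counter state by a stateless sliding-window test: zip four shifted views of the path and return whether any 4 consecutive points are equally spaced (an arithmetic progression), which is exactly a run of 3 equal moves; the len<4 guard disappears.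
import Mathlib
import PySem

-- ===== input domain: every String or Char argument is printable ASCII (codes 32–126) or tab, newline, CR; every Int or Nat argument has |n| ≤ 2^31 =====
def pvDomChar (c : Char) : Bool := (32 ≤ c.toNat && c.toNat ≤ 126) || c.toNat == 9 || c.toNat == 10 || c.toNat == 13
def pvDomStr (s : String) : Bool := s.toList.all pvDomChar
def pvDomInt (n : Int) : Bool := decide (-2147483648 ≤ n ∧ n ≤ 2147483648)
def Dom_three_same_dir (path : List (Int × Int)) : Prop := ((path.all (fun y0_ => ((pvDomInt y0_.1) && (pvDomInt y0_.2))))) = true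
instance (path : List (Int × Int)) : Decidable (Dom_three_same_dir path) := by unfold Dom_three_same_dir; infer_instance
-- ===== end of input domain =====

-- B replaces A's last-direction/counter loop by a stateless sliding-window test: any 4
-- consecutive points equally spaced (zip of four shifted views); same behaviour, no speed claim.


-- ===== PORT A =====
-- the for-loop over i in range(len(path)-1) with early 'return True', as a recursion on i;
-- path[i] and path[i+1] are always in range here, so plain safe indexing is exact
def threeLoopA (path : List (Int × Int)) : Nat → Nat → Option (Int × Int) → Int → Bool
  | 0, _, _, _ => false
  | fuel + 1, i, last, cnt =>
    if h : i + 1 < path.length then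
      let rc := path[i]
      let nrc := path[i + 1]
      let direction : Int × Int := (nrc.1 - rc.1, nrc.2 - rc.2)
      let cnt' := if some direction = last then cnt + 1 else 1
      if 3 ≤ cnt' then true
      else threeLoopA path fuel (i + 1) (some direction) cnt'
    else false

def three_same_dir (path : List (Int × Int)) : Bool :=
  if path.length < 4 then false
  else threeLoopA path path.length 0 none 0

-- ===== PORT B =====
-- Source B: any(...) over zip(path, path[1:], path[2:], path[3:]) testing the window condition
def three_same_dir_alt (path : List (Int × Int)) : Bool :=
  (path.zip (path.tail.zip (path.tail.tail.zip path.tail.tail.tail))).any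
    (fun q =>
      decide ((q.2.1.1 - q.1.1, q.2.1.2 - q.1.2)
                = (q.2.2.1.1 - q.2.1.1, q.2.2.1.2 - q.2.1.2)
            ∧ (q.2.2.1.1 - q.2.1.1, q.2.2.1.2 - q.2.1.2)
                = (q.2.2.2.1 - q.2.2.1.1, q.2.2.2.2 - q.2.2.1.2)))

-- ===== PRECONDITION & SPEC =====
def Spec_three_same_dir (path : List (Int × Int)) (out : Bool) : Prop := out = three_same_dir_alt path
instance (path : List (Int × Int)) (out : Bool) : Decidable (Spec_three_same_dir path out) := by unfold Spec_three_same_dir; infer_instance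

-- ===== CLAIM (what is proved, stated in full; the proofs are below) =====
def Claim_equal_three_same_dir : Prop := ∀ (path : List (Int × Int)), Dom_three_same_dir path → Spec_three_same_dir path (three_same_dir path)

-- ===== LEMMAS AND PROOFS =====

-- proof-side mirror of A's loop, recursing on the suffix of the delta list
def threeGoA (last : Option (Int × Int)) (cnt : Int) : List (Int × Int) → Bool
  | [] => false
  | d :: rest =>
    let cnt' := if some d = last then cnt + 1 else 1
    if 3 ≤ cnt' then true else threeGoA (some d) cnt' rest

def threeDeltas (path : List (Int × Int)) : List (Int × Int) :=
  List.zipWith (fun a b => (b.1 - a.1, b.2 - a.2)) path path.tail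

-- window scan over the delta list: three equal consecutive deltas
def winD : List (Int × Int) → Bool
  | x :: y :: z :: rest => (decide (x = y ∧ y = z)) || winD (y :: z :: rest)
  | _ => false

lemma threeDeltas_length (path : List (Int × Int)) :
    (threeDeltas path).length = path.length - 1 := by
  simp [threeDeltas]

lemma threeLoopA_eq_goA (path : List (Int × Int)) (fuel i : Nat) (last : Option (Int × Int))
    (cnt : Int) (hf : path.length - 1 - i ≤ fuel) :
    threeLoopA path fuel i last cnt = threeGoA last cnt ((threeDeltas path).drop i) := by
  induction fuel generalizing i last cnt with
  | zero =>
    have : (threeDeltas path).drop i = [] := by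
      apply List.drop_eq_nil_of_le
      rw [threeDeltas_length]; omega
    rw [this, threeGoA, threeLoopA]
  | succ fuel ih =>
    by_cases h : i + 1 < path.length
    · have hi : i < (threeDeltas path).length := by rw [threeDeltas_length]; omega
      have hdrop : (threeDeltas path).drop i
          = (threeDeltas path)[i] :: (threeDeltas path).drop (i + 1) :=
        List.drop_eq_getElem_cons hi
      have hget : (threeDeltas path)[i]
          = ((path[i + 1]'h).1 - (path[i]'(by omega)).1,
             (path[i + 1]'h).2 - (path[i]'(by omega)).2) := by
        simp [threeDeltas, List.getElem_zipWith, List.getElem_tail]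
      rw [threeLoopA, hdrop, threeGoA, hget]
      simp only [h, dite_true]
      split_ifs <;> first | rfl | exact ih (i + 1) _ _ (by omega)
    · have : (threeDeltas path).drop i = [] := by
        apply List.drop_eq_nil_of_le
        rw [threeDeltas_length]; omega
      rw [threeLoopA, this, threeGoA]
      simp [h]

lemma winD_skip (p x : Int × Int) (r : List (Int × Int)) (hne : p ≠ x) :
    winD (p :: x :: r) = winD (x :: r) := by
  match r with
  | [] => rfl
  | y :: r' => simp [winD, hne]

-- A's loop state (run of length 1 resp. 2 ending in p) vs the window scan
lemma threeGoA_win (l : List (Int × Int)) :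
    (∀ p, threeGoA (some p) 1 l = winD (p :: l)) ∧
    (∀ p, threeGoA (some p) 2 l = winD (p :: p :: l)) := by
  induction l with
  | nil => constructor <;> intro p <;> rfl
  | cons x r ih =>
    constructor
    · intro p
      by_cases hx : x = p
      · subst hx
        rw [threeGoA]
        norm_num
        exact ih.2 x
      · have hne : some x ≠ some p := by simpa using hx
        rw [threeGoA]
        simp only [if_neg hne]
        norm_num
        rw [ih.1 x, winD_skip p x r (Ne.symm hx)]
    · intro p
      by_cases hx : x = p
      · subst hx
        rw [threeGoA]
        simp [winD]
      · have hne : some x ≠ some p := by simpa using hx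
        rw [threeGoA]
        simp only [if_neg hne]
        norm_num
        rw [ih.1 x]
        have h1 : winD (p :: p :: x :: r) = winD (p :: x :: r) := by
          simp [winD, Ne.symm hx]
        rw [h1, winD_skip p x r (Ne.symm hx)]

lemma threeGoA_eq_winD (l : List (Int × Int)) : threeGoA none 0 l = winD l := by
  match l with
  | [] => rfl
  | d :: rest =>
    rw [threeGoA]
    have hne : some d ≠ (none : Option (Int × Int)) := by simp
    simp only [if_neg hne]
    norm_num
    exact (threeGoA_win rest).1 d

lemma winD_short (l : List (Int × Int)) (h : l.length ≤ 2) : winD l = false := by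
  match l with
  | [] => rfl
  | [_] => rfl
  | [_, _] => rfl
  | _ :: _ :: _ :: _ => simp at h

-- B's quadruple-window any equals the window scan over the deltas
lemma alt_eq_winD (path : List (Int × Int)) :
    three_same_dir_alt path = winD (threeDeltas path) := by
  induction path with
  | nil => rfl
  | cons a t ih =>
    match t with
    | [] => rfl
    | [_] => rfl
    | [_, _] => rfl
    | b :: c :: d :: rest =>
      have ih' := ih
      simp only [three_same_dir_alt, List.tail_cons] at ih' ⊢
      rw [List.zip_cons_cons, List.zip_cons_cons, List.zip_cons_cons, List.any_cons, ih']
      simp [threeDeltas, winD, Prod.ext_iff]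

-- ===== VERDICT (by name: the statement is the Claim_ definition above) =====
theorem three_same_dir_spec : Claim_equal_three_same_dir := by
  intro path _
  show three_same_dir path = three_same_dir_alt path
  rw [alt_eq_winD]
  unfold three_same_dir
  by_cases h : path.length < 4
  · rw [if_pos h]
    refine (winD_short _ ?_).symm
    rw [threeDeltas_length]; omega
  · rw [if_neg h, threeLoopA_eq_goA path path.length 0 none 0 (by omega), List.drop_zero,
      threeGoA_eq_winD]
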